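-- pv_equiv track=rewrite | github.com/kamilkolo22/Grafy | Zajecia2.py | prufer
-- ===== SOURCE A (Python) =====
-- from copy import deepcopy
--
-- def prufer(tree):
--     """Kod Prufera drzewa - podany jako napis"""
--     tr = deepcopy(tree)
--     code = ""
--     for i in range(len(tree)-2):
--         for x in sorted(tr):
--             if len(tr[x]) == 1:     #liść pierwszy - jednocześnie najmniejszy
--                 v = tr[x][0]
--                 code += f" {v}"
--                 tr[v].remove(x)     #usuwam x z listy sąsiadów
--                 tr.pop(x)   #usuwam x z drzewa
--                 break
--     return code
-- ===== SOURCE B (Python) =====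
-- def prufer(tree):
--     """Kod Prufera drzewa - podany jako napis.
--     Klasyczny liniowy algorytm: jeden monotoniczny wskaznik po posortowanych
--     wierzcholkach zamiast skanu wszystkich lisci w kazdej rundzie; nowy lisc
--     mniejszy od frontu wskaznika jest obslugiwany natychmiast (kaskada)."""
--     verts = sorted(tree)
--     n = len(verts)
--     deg = {x: len(ns) for x, ns in tree.items()}
--     alive = set(tree)
--     code = ""
--     ptr = 0
--     leaf = None
--     for _ in range(n - 2):
--         if leaf is None:
--             while ptr < n and deg[verts[ptr]] != 1:
--                 ptr += 1
--             if ptr == n: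
--                 break
--             leaf = verts[ptr]
--             ptr += 1
--         v = next(y for y in tree[leaf] if y in alive)
--         code += f" {v}"
--         alive.remove(leaf)
--         deg[v] -= 1
--         if deg[v] == 1 and (ptr == n or v < verts[ptr]):
--             leaf = v
--         else:
--             leaf = None
--     return code
-- ===== Notes on version B (the rewrite author's own statement) =====
-- stated objective: faster
-- what changed: B is the classic linear Prüfer construction: it sorts the vertices once and sweeps a monotone pointer over them for leaves, handling a newly created leaf below the sweep front immediately as a cascade, instead of A's per-round key re-sort, first-leaf scan and adjacency-list surgery on a deepcopy of the dict.
-- outside the precondition, e.g. on prufer({1: [2], 2: [1], 3: [1]}): A returns ' 2', B returns ' 2'; on prufer({1: [2], 2: [3], 3: [2]}): A raises ValueError, B returns ' 2'; on prufer({1: [3], 2: [3], 3: [1]}): A returns ' 3', B returns ' 3'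
import Mathlib
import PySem

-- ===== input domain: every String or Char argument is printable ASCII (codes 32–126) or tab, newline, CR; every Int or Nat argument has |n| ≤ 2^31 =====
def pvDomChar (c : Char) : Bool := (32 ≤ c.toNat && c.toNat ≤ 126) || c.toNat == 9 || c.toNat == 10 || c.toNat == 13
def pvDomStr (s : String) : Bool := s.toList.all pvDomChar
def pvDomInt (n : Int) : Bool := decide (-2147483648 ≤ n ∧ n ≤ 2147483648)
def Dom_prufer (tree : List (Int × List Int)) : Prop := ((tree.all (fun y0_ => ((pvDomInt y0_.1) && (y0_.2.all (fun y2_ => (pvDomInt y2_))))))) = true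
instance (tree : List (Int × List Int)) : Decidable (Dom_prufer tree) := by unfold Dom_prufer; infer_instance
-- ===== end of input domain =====

-- B replaces A's per-round deepcopy + key-sort + neighbour-list surgery by the classic
-- linear Prüfer construction (sort once, monotone leaf pointer with cascade); objective:
-- faster — asymptotically better selection; equality proved on Pre_, return value only.


-- ===== PORT A =====
-- one round of A's outer loop: 'for x in sorted(tr): if len(tr[x]) == 1: … break'
def pruferStepA (tr : PySem.Dict Int (List Int)) (code : String) :
    PySem.Dict Int (List Int) × String :=
  match (PySem.List.sorted tr.keys (fun x => x) false).find?
      (fun x => (tr.getD x []).length == 1) with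
  | none => (tr, code)
  | some x =>
      let v : Int := PySem.List.pyGetD (tr.getD x []) 0 0
      let code := code ++ " " ++ PySem.Int.toStr v
      -- tr[v].remove(x): KeyError (v not a key) / ValueError (x ∉ tr[v]) are excluded by
      -- Pre_prufer; the getD defaults mark exactly those raise points
      let tr := tr.modify v [] (fun l => (PySem.List.remove? l x).getD l)
      (tr.erase x, code)

def prufer (tree : List (Int × List Int)) : String :=
  let tr := PySem.Dict.ofList tree          -- tr = deepcopy(tree)
  ((PySem.List.pyRange 0 ((tree.length : Int) - 2) 1).foldl
      (fun s _ => pruferStepA s.1 s.2) (tr, "")).2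

-- ===== PORT B =====
-- 'while ptr < n and deg[verts[ptr]] != 1: ptr += 1'
def sweep (verts : List Int) (deg : PySem.Dict Int Int) (ptr : Nat) : Nat :=
  if h : ptr < verts.length then
    if deg.getD verts[ptr] 0 == 1 then ptr else sweep verts deg (ptr + 1)
  else ptr
termination_by verts.length - ptr
decreasing_by omega

-- the loop body shared by the cascade and the sweep branch: emit the neighbour of leaf x,
-- kill x, decrement the neighbour, decide whether it cascades
def ptrEmit (td : PySem.Dict Int (List Int)) (verts : List Int)
    (deg : PySem.Dict Int Int) (alive : PySem.Set Int) (ptr : Nat) (x : Int) (code : String) :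
    PySem.Dict Int Int × PySem.Set Int × Option Int × String :=
  -- v = next(y for y in tree[x] if y in alive); StopIteration/KeyError are outside Pre_
  let v : Int := ((td.getD x []).find? (fun y => PySem.Set.contains alive y)).getD 0
  let code := code ++ " " ++ PySem.Int.toStr v
  let alive := (PySem.Set.remove? alive x).getD alive
  let deg := deg.modify v 0 (fun d => d - 1)
  let leaf : Option Int :=
    if deg.getD v 0 == 1 && (decide (ptr = verts.length) || decide (v < verts.getD ptr 0))
    then some v else none
  (deg, alive, leaf, code)

def ptrLoop (td : PySem.Dict Int (List Int)) (verts : List Int) (fuel : Nat)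
    (deg : PySem.Dict Int Int) (alive : PySem.Set Int) (ptr : Nat) (leaf : Option Int)
    (code : String) : String :=
  match fuel with
  | 0 => code
  | Nat.succ n =>
    match leaf with
    | some x =>
        let s := ptrEmit td verts deg alive ptr x code
        ptrLoop td verts n s.1 s.2.1 ptr s.2.2.1 s.2.2.2
    | none =>
        let p := sweep verts deg ptr
        if p = verts.length then code
        else
          let s := ptrEmit td verts deg alive (p + 1) (verts.getD p 0) code
          ptrLoop td verts n s.1 s.2.1 (p + 1) s.2.2.1 s.2.2.2

def prufer_alt (tree : List (Int × List Int)) : String :=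
  let verts := PySem.List.sorted (tree.map (·.1)) (fun x => x) false
  let deg := tree.foldl (fun d p => d.insert p.1 ((p.2.length : Int))) PySem.Dict.empty
  let alive := PySem.Set.ofList (tree.map (·.1))
  ptrLoop (PySem.Dict.ofList tree) verts (verts.length - 2) deg alive 0 none ""

-- ===== PRECONDITION & SPEC =====
-- Pre_ admits lists with at most 2 entries or without any length-1 adjacency list (the loops
-- do nothing), and otherwise requires a duplicate-free, self-loop-free, symmetric adjacency
-- list; it excludes irregular adjacency inputs, on which A can raise KeyError/ValueError
-- mid-loop (though on some it still returns), and duplicate-key lists, which no Python dict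
-- can represent.
def Pre_prufer (tree : List (Int × List Int)) : Prop :=
  tree.length ≤ 2 ∨
    (∀ p ∈ tree, p.2.length ≠ 1) ∨
    ((tree.map (·.1)).Nodup ∧
      ∀ p ∈ tree, p.2.Nodup ∧ p.1 ∉ p.2 ∧
        ∀ y ∈ p.2, ∃ q ∈ tree, q.1 = y ∧ p.1 ∈ q.2)
instance (tree : List (Int × List Int)) : Decidable (Pre_prufer tree) := by
  unfold Pre_prufer; infer_instance

def pvWitness_prufer : (List (Int × List Int)) := [(1, [2]), (2, [1, 3]), (3, [2])]

def Spec_prufer (tree : List (Int × List Int)) (out : String) : Prop := out = prufer_alt tree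
instance (tree : List (Int × List Int)) (out : String) : Decidable (Spec_prufer tree out) := by
  unfold Spec_prufer; infer_instance

-- ===== CLAIM (what is proved, stated in full; the proofs are below) =====
def Claim_equal_prufer : Prop :=
  ∀ (tree : List (Int × List Int)), Dom_prufer tree → Pre_prufer tree →
    Spec_prufer tree (prufer tree)

-- ===== LEMMAS AND PROOFS =====

-- the original adjacency list of a vertex (lookup in the input dict)
def adjOf (tree : List (Int × List Int)) (a : Int) : List Int :=
  (PySem.Dict.ofList tree).getD a []

-- neighbours of a that are still alive
def liveAdj (tree : List (Int × List Int)) (alive : List Int) (a : Int) : List Int :=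
  (adjOf tree a).filter (fun y => PySem.Set.contains alive y)

-- the dict A's loop holds after some rounds, as a function of the alive vertices
def mkTr (tree : List (Int × List Int)) (alive : List Int) : PySem.Dict Int (List Int) :=
  PySem.Dict.mk (alive.map (fun a => (a, liveAdj tree alive a)))

-- a fold whose function ignores the list element is an iterate
lemma foldl_const_eq_iterate {α β : Type} (g : β → β) :
    ∀ (l : List α) (s : β), l.foldl (fun s _ => g s) s = g^[l.length] s := by
  intro l
  induction l with
  | nil => intro s; rfl
  | cons a t ih =>
      intro s
      simp [List.foldl_cons, ih, Function.iterate_succ_apply]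

-- find? is the head of the filtered list
lemma find?_eq_head?_filter {α : Type} (p : α → Bool) (l : List α) :
    l.find? p = (l.filter p).head? := by
  induction l with
  | nil => rfl
  | cons a t ih =>
      by_cases h : p a
      · rw [List.find?_cons_of_pos h, List.filter_cons_of_pos h, List.head?_cons]
      · rw [List.find?_cons_of_neg (by simp [h]), List.filter_cons_of_neg (by simp [h]), ih]

-- first-match lookup in a dict of the shape mkTr
lemma get?_mapDict (l : List Int) (g : Int → List Int) (x : Int) :
    (PySem.Dict.mk (l.map (fun a => (a, g a)))).get? x
      = if x ∈ l then some (g x) else none := by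
  induction l with
  | nil => simp [PySem.Dict.get?]
  | cons a t ih =>
      by_cases h : a = x
      · subst h
        simp only [PySem.Dict.get?, List.map_cons]
        rw [List.find?_cons_of_pos (by simp)]
        simp
      · simp only [PySem.Dict.get?, List.map_cons] at ih ⊢
        rw [List.find?_cons_of_neg (by simp [h])]
        rw [ih]
        simp [Ne.symm h]

lemma keys_mapDict (l : List Int) (g : Int → List Int) :
    (PySem.Dict.mk (l.map (fun a => (a, g a)))).keys = l := by
  simp only [PySem.Dict.keys, List.map_map]
  exact List.map_id' l

-- the first leaf in sorted key order IS the minimum leaf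
lemma find?_sorted_eq_min? (l : List Int) (p : Int → Bool) :
    (PySem.List.sorted l (fun x => x) false).find? p
      = PySem.List.min? (l.filter p) (fun x => x) := by
  have hperm := PySem.List.sorted_perm l (fun x => x) false
  have hpw : (PySem.List.sorted l (fun x => x) false).Pairwise (· ≤ ·) :=
    PySem.List.sorted_pairwise l (fun x => x)
  cases hf : (PySem.List.sorted l (fun x => x) false).find? p with
  | none =>
      have hnone := List.find?_eq_none.mp hf
      have hfil : l.filter p = [] := by
        apply List.filter_eq_nil_iff.mpr
        intro x hx
        simpa using hnone x (hperm.mem_iff.mpr hx)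
      rw [hfil]
      rfl
  | some m =>
      have hpm : p m = true := List.find?_some hf
      have hm_l : m ∈ l := hperm.mem_iff.mp (List.mem_of_find?_eq_some hf)
      have hm_f : m ∈ l.filter p := List.mem_filter.mpr ⟨hm_l, hpm⟩
      cases hmin : PySem.List.min? (l.filter p) (fun x => x) with
      | none =>
          rw [PySem.List.min?_eq_none_iff] at hmin
          simp [hmin] at hm_f
      | some m' =>
          have h1 : m' ∈ l.filter p := PySem.List.min?_mem hmin
          have h2 : ∀ y ∈ l.filter p, m' ≤ y := PySem.List.min?_isMin hmin
          have h3 : ∀ y ∈ l.filter p, m ≤ y := by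
            obtain ⟨_, as, bs, hsplit, hfail⟩ := List.find?_eq_some_iff_append.mp hf
            intro y hy
            have hys : y ∈ as ++ m :: bs := by
              rw [← hsplit]
              exact hperm.mem_iff.mpr (List.mem_of_mem_filter hy)
            have hpy : p y = true := (List.mem_filter.mp hy).2
            rw [hsplit] at hpw
            rcases List.mem_append.mp hys with h | h
            · exact absurd hpy (by simpa using hfail y h)
            · rcases List.mem_cons.mp h with rfl | h
              · exact le_refl y
              · exact List.rel_of_pairwise_cons (List.pairwise_append.mp hpw).2.1 h
          have : m = m' := le_antisymm (h3 m' h1) (h2 m hm_f)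
          rw [this]

-- a member below every member is the min
lemma min?_eq_some_of_min (l : List Int) (x : Int) (hx : x ∈ l)
    (hmin : ∀ y ∈ l, x ≤ y) : PySem.List.min? l (fun z => z) = some x := by
  cases h : PySem.List.min? l (fun z => z) with
  | none => rw [PySem.List.min?_eq_none_iff] at h; simp [h] at hx
  | some m =>
      have h1 := PySem.List.min?_mem h
      have h2 := PySem.List.min?_isMin h
      have : m = x := le_antisymm (h2 x hx) (hmin m h1)
      rw [this]

-- the items of Dict.ofList on a duplicate-free association list
lemma items_ofList_nodup (tree : List (Int × List Int))
    (h : (tree.map (·.1)).Nodup) : (PySem.Dict.ofList tree).items = tree := by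
  have h0 : ∀ p ∈ tree, (PySem.Dict.empty : PySem.Dict Int (List Int)).contains
      ((fun q : Int × List Int => q.1) p) = false := by intro p _; rfl
  have hfresh : (PySem.Dict.ofList tree).items
      = (PySem.Dict.empty : PySem.Dict Int (List Int)).items
          ++ tree.map (fun a => (a.1, a.2)) :=
    PySem.Dict.items_foldl_insert_fresh tree (fun q => q.1) (fun q => q.2)
      PySem.Dict.empty h0 (by simpa using h)
  rw [hfresh]
  simp [PySem.Dict.empty]

-- getD on mkTr for a live vertex
lemma getD_mkTr (tree : List (Int × List Int)) (alive : List Int) (a : Int) (ha : a ∈ alive) :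
    (mkTr tree alive).getD a [] = liveAdj tree alive a := by
  simp [PySem.Dict.getD, mkTr, get?_mapDict, ha]

lemma contains_filter_ne (alive : List Int) (x z : Int) :
    PySem.Set.contains (alive.filter (fun y => !(y == x))) z
      = (PySem.Set.contains alive z && !(z == x)) := by
  by_cases hz : z ∈ alive <;> by_cases hzx : z = x <;>
    simp [PySem.Set.contains, hz, hzx, List.mem_filter]

-- removing x from the alive set filters it out of every live adjacency list
lemma liveAdj_filter (tree : List (Int × List Int)) (alive : List Int) (x a : Int) :
    liveAdj tree (alive.filter (fun y => !(y == x))) a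
      = (liveAdj tree alive a).filter (fun z => !(z == x)) := by
  unfold liveAdj
  rw [List.filter_filter]
  apply List.filter_congr
  intro z _
  rw [contains_filter_ne, Bool.and_comm]

lemma stepA_none (tr : PySem.Dict Int (List Int)) (code : String)
    (h : (PySem.List.sorted tr.keys (fun x => x) false).find?
      (fun x => (tr.getD x []).length == 1) = none) :
    pruferStepA tr code = (tr, code) := by
  unfold pruferStepA; rw [h]

lemma stepA_some (tr : PySem.Dict Int (List Int)) (code : String) (x : Int)
    (h : (PySem.List.sorted tr.keys (fun x => x) false).find?
      (fun x => (tr.getD x []).length == 1) = some x) :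
    pruferStepA tr code =
      ((tr.modify (PySem.List.pyGetD (tr.getD x []) 0 0) []
          (fun l => (PySem.List.remove? l x).getD l)).erase x,
        code ++ " " ++ PySem.Int.toStr (PySem.List.pyGetD (tr.getD x []) 0 0)) := by
  unfold pruferStepA; rw [h]

-- A's dict surgery on a leaf x with live neighbour v produces exactly mkTr of the smaller set
lemma modify_erase_mkTr (tree : List (Int × List Int)) (alive : List Int) (x v : Int)
    (hv_alive : v ∈ alive)
    (hx_livev : x ∈ liveAdj tree alive v)
    (hla₂ : ∀ a ∈ alive, a ≠ v →
      liveAdj tree (alive.filter (fun y => !(y == x))) a = liveAdj tree alive a)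
    (hla₂v : liveAdj tree (alive.filter (fun y => !(y == x))) v
      = (liveAdj tree alive v).erase x) :
    ((mkTr tree alive).modify v [] (fun l => (PySem.List.remove? l x).getD l)).erase x
      = mkTr tree (alive.filter (fun y => !(y == x))) := by
  set alive₂ := alive.filter (fun y => !(y == x)) with halive₂
  have hw := PySem.List.remove?_eq_some_erase (liveAdj tree alive v) x hx_livev
  have hcont : (mkTr tree alive).contains v = true := by
    rw [PySem.Dict.contains_iff_mem_keys]
    rw [show (mkTr tree alive).keys = alive from keys_mapDict alive _]
    exact hv_alive
  rw [PySem.Dict.modify, getD_mkTr tree alive v hv_alive, hw, Option.getD_some]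
  apply PySem.Dict.ext
  rw [show ∀ (d : PySem.Dict Int (List Int)), (d.erase x).items
        = d.items.filter (fun p => !(p.1 == x)) from fun d => rfl]
  rw [PySem.Dict.items_insert_of_contains _ _ hcont]
  show ((alive.map (fun a => (a, liveAdj tree alive a))).map
      (fun p => if p.1 == v then (v, (liveAdj tree alive v).erase x) else p)).filter
      (fun p => !(p.1 == x))
    = alive₂.map (fun a => (a, liveAdj tree alive₂ a))
  rw [List.map_map]
  have h1 : alive.map ((fun p : Int × List Int =>
        if p.1 == v then (v, (liveAdj tree alive v).erase x) else p)
      ∘ (fun a => (a, liveAdj tree alive a)))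
      = alive.map (fun a => (a, if a = v then (liveAdj tree alive v).erase x
          else liveAdj tree alive a)) := by
    apply List.map_congr_left
    intro a _
    by_cases hav : a = v
    · subst hav; simp
    · simp [hav]
  rw [h1, List.filter_map]
  have h2 : alive.filter ((fun p : Int × List Int => !(p.1 == x))
        ∘ (fun a => (a, if a = v then (liveAdj tree alive v).erase x
            else liveAdj tree alive a)))
      = alive₂ := by rfl
  rw [h2]
  apply List.map_congr_left
  intro a ha₂
  have ha : a ∈ alive := List.mem_of_mem_filter ha₂
  by_cases hav : a = v
  · subst hav; simp [hla₂v]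
  · simp [hav, hla₂ a ha hav]

-- the sweep stops at the first leaf index at or after ptr
lemma sweep_spec (verts : List Int) (deg : PySem.Dict Int Int) :
    ∀ (k ptr : Nat), verts.length ≤ ptr + k → ptr ≤ verts.length →
      ptr ≤ sweep verts deg ptr ∧ sweep verts deg ptr ≤ verts.length ∧
      (∀ i (h : i < verts.length), ptr ≤ i → i < sweep verts deg ptr →
        ¬ deg.getD (verts[i]'h) 0 = 1) ∧
      (∀ h : sweep verts deg ptr < verts.length,
        deg.getD (verts[sweep verts deg ptr]'h) 0 = 1) := by
  intro k
  induction k with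
  | zero =>
      intro ptr h1 h2
      have hptr : ¬ ptr < verts.length := by omega
      rw [sweep, dif_neg hptr]
      exact ⟨le_rfl, h2, fun i h hpi hip => absurd hip (by omega),
        fun h => absurd h (by omega)⟩
  | succ k ih =>
      intro ptr h1 h2
      by_cases hlt : ptr < verts.length
      · rw [sweep, dif_pos hlt]
        by_cases hd : (deg.getD (verts[ptr]'hlt) 0 == 1) = true
        · rw [if_pos hd]
          exact ⟨le_rfl, le_of_lt hlt,
            fun i h hpi hip => absurd hip (by omega),
            fun h => by simpa using hd⟩
        · rw [if_neg hd]
          obtain ⟨a, b, c, d2⟩ := ih (ptr + 1) (by omega) (by omega)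
          refine ⟨by omega, b, ?_, d2⟩
          intro i h hpi hip
          rcases Nat.eq_or_lt_of_le hpi with heq | h'
          · subst heq; simpa using hd
          · exact c i h h' hip
      · rw [sweep, dif_neg hlt]
        exact ⟨le_rfl, h2, fun i h hpi hip => absurd hip (by omega),
          fun h => absurd h (by omega)⟩

-- the shared step: A removes the minimum leaf x and B (fed x by cascade or sweep, with the
-- post-selection pointer ptr') do the same surgery and re-establish the invariants
lemma step_case (tree : List (Int × List Int)) (verts : List Int)
    (hN : ∀ a ∈ tree.map (·.1), (adjOf tree a).Nodup)
    (hS : ∀ a ∈ tree.map (·.1), a ∉ adjOf tree a)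
    (hE : ∀ a ∈ tree.map (·.1), ∀ y ∈ adjOf tree a,
            y ∈ tree.map (·.1) ∧ a ∈ adjOf tree y)
    (hvS : verts.Pairwise (· < ·))
    (hvM : ∀ a, a ∈ verts ↔ a ∈ tree.map (·.1))
    (n : Nat)
    (ih : ∀ (alive : List Int) (deg : PySem.Dict Int Int) (ptr : Nat) (leaf : Option Int)
        (code : String),
      alive.Nodup → (∀ a ∈ alive, a ∈ tree.map (·.1)) →
      (∀ a ∈ alive, deg.getD a 0 = ((liveAdj tree alive a).length : Int)) →
      ptr ≤ verts.length →
      (∀ i (h : i < verts.length), ptr ≤ i → verts[i]'h ∈ alive) →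
      (∀ a ∈ alive, (liveAdj tree alive a).length = 1 →
        leaf = some a ∨ ∃ i, ∃ h : i < verts.length, ptr ≤ i ∧ verts[i]'h = a) →
      (∀ x, leaf = some x → x ∈ alive ∧ (liveAdj tree alive x).length = 1 ∧
        ∀ h : ptr < verts.length, x < verts[ptr]'h) →
      ((fun s : PySem.Dict Int (List Int) × String => pruferStepA s.1 s.2)^[n]
          (mkTr tree alive, code)).2
        = ptrLoop (PySem.Dict.ofList tree) verts n deg alive ptr leaf code)
    (alive : List Int) (deg : PySem.Dict Int Int) (code : String)
    (hnd : alive.Nodup) (hsub : ∀ a ∈ alive, a ∈ tree.map (·.1))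
    (hdeg : ∀ a ∈ alive, deg.getD a 0 = ((liveAdj tree alive a).length : Int))
    (x : Int) (hx_alive : x ∈ alive) (hLx1 : (liveAdj tree alive x).length = 1)
    (ptr' : Nat) (hptr' : ptr' ≤ verts.length)
    (G3 : ∀ i (h : i < verts.length), ptr' ≤ i → verts[i]'h ∈ alive)
    (G0 : ∀ i (h : i < verts.length), ptr' ≤ i → x < verts[i]'h)
    (G1 : ∀ a ∈ alive, a ≠ x → (liveAdj tree alive a).length = 1 →
      ∃ i, ∃ h : i < verts.length, ptr' ≤ i ∧ verts[i]'h = a) :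
    ((fun s : PySem.Dict Int (List Int) × String => pruferStepA s.1 s.2)^[n]
        (pruferStepA (mkTr tree alive) code)).2
      = ptrLoop (PySem.Dict.ofList tree) verts n
          (ptrEmit (PySem.Dict.ofList tree) verts deg alive ptr' x code).1
          (ptrEmit (PySem.Dict.ofList tree) verts deg alive ptr' x code).2.1 ptr'
          (ptrEmit (PySem.Dict.ofList tree) verts deg alive ptr' x code).2.2.1
          (ptrEmit (PySem.Dict.ofList tree) verts deg alive ptr' x code).2.2.2 := by
  have hkeys : (mkTr tree alive).keys = alive := keys_mapDict alive _
  have hxK : x ∈ tree.map (·.1) := hsub x hx_alive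
  obtain ⟨v, hLx⟩ := List.length_eq_one_iff.mp hLx1
  have hv_live : v ∈ liveAdj tree alive x := by rw [hLx]; exact List.mem_singleton_self v
  have hv_adj : v ∈ adjOf tree x := List.mem_of_mem_filter hv_live
  have hv_alive : v ∈ alive :=
    (PySem.Set.contains_iff alive v).mp (List.of_mem_filter hv_live)
  have hvx : v ≠ x := fun h => hS x hxK (h ▸ hv_adj)
  have hx_adjv : x ∈ adjOf tree v := (hE x hxK v hv_adj).2
  have hx_livev : x ∈ liveAdj tree alive v :=
    List.mem_filter.mpr ⟨hx_adjv, (PySem.Set.contains_iff alive x).mpr hx_alive⟩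
  -- A selects x: the first leaf in sorted key order is the minimum leaf, which is x
  have hpq : alive.filter (fun a => ((mkTr tree alive).getD a []).length == 1)
      = alive.filter (fun a => (liveAdj tree alive a).length == 1) := by
    apply List.filter_congr
    intro a ha
    rw [getD_mkTr tree alive a ha]
  have hmin : PySem.List.min?
      (alive.filter (fun a => (liveAdj tree alive a).length == 1)) (fun z => z) = some x := by
    apply min?_eq_some_of_min
    · exact List.mem_filter.mpr ⟨hx_alive, by simp [hLx1]⟩
    · intro y hy
      obtain ⟨hya, hyl⟩ := List.mem_filter.mp hy
      have hy1 : (liveAdj tree alive y).length = 1 := by simpa using hyl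
      by_cases hyx : y = x
      · subst hyx; exact le_refl y
      · obtain ⟨i, h, hpi, hvi⟩ := G1 y hya hyx hy1
        have := G0 i h hpi
        rw [hvi] at this
        exact this.le
  have hfind : (PySem.List.sorted (mkTr tree alive).keys (fun x => x) false).find?
      (fun a => ((mkTr tree alive).getD a []).length == 1) = some x := by
    rw [hkeys, find?_sorted_eq_min?, hpq, hmin]
  -- A's emitted vertex and B's emitted vertex are both v
  have hvA : PySem.List.pyGetD ((mkTr tree alive).getD x []) 0 0 = v := by
    rw [getD_mkTr tree alive x hx_alive, hLx, PySem.List.pyGetD_zero_cons]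
  have hvB : (((PySem.Dict.ofList tree).getD x []).find?
      (fun y => PySem.Set.contains alive y)).getD 0 = v := by
    rw [find?_eq_head?_filter]
    show ((liveAdj tree alive x).head?).getD 0 = v
    rw [hLx]; rfl
  -- the new alive set
  set alive₂ := alive.filter (fun y => !(y == x)) with halive₂
  have halive₂_mem : ∀ z, z ∈ alive₂ ↔ z ∈ alive ∧ z ≠ x := by
    intro z; rw [halive₂, List.mem_filter]; simp
  have hB_alive : (PySem.Set.remove? alive x).getD alive = alive₂ := by
    unfold PySem.Set.remove?
    rw [if_pos ((PySem.Set.contains_iff alive x).mpr hx_alive)]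
    rfl
  -- x's only live occurrence elsewhere is in v's list
  have honly : ∀ a ∈ alive, a ≠ v → x ∉ liveAdj tree alive a := by
    intro a ha hav hxa
    have hxadj : x ∈ adjOf tree a := List.mem_of_mem_filter hxa
    have haadjx : a ∈ adjOf tree x := (hE a (hsub a ha) x hxadj).2
    have : a ∈ liveAdj tree alive x :=
      List.mem_filter.mpr ⟨haadjx, (PySem.Set.contains_iff alive a).mpr ha⟩
    rw [hLx] at this
    exact hav (by simpa using this)
  have hla₂ : ∀ a ∈ alive, a ≠ v →
      liveAdj tree alive₂ a = liveAdj tree alive a := by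
    intro a ha hav
    rw [halive₂, liveAdj_filter]
    apply List.filter_eq_self.mpr
    intro z hz
    simp only [Bool.not_eq_true', beq_eq_false_iff_ne, ne_eq]
    intro hzx
    exact honly a ha hav (hzx ▸ hz)
  have hndLv : (liveAdj tree alive v).Nodup :=
    (hN v (hsub v hv_alive)).filter _
  have hla₂v : liveAdj tree alive₂ v = (liveAdj tree alive v).erase x := by
    rw [halive₂, liveAdj_filter, List.Nodup.erase_eq_filter hndLv]
    rfl
  have hlenv : (liveAdj tree alive₂ v).length + 1
      = (liveAdj tree alive v).length := by
    rw [hla₂v, List.length_erase_of_mem hx_livev]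
    have : 0 < (liveAdj tree alive v).length := List.length_pos_of_mem hx_livev
    omega
  have htr₂ : ((mkTr tree alive).modify v []
        (fun l => (PySem.List.remove? l x).getD l)).erase x = mkTr tree alive₂ :=
    modify_erase_mkTr tree alive x v hv_alive hx_livev hla₂ hla₂v
  have hv₂ : v ∈ alive₂ := (halive₂_mem v).mpr ⟨hv_alive, hvx⟩
  have hdeg₂ : ∀ a ∈ alive₂, (deg.modify v 0 (fun d => d - 1)).getD a 0
      = ((liveAdj tree alive₂ a).length : Int) := by
    intro a ha₂
    obtain ⟨ha, hax⟩ := (halive₂_mem a).mp ha₂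
    rw [PySem.Dict.modify, PySem.Dict.getD_insert]
    by_cases hav : a = v
    · subst hav
      rw [if_pos rfl, hdeg a ha]
      omega
    · rw [if_neg hav, hdeg a ha, hla₂ a ha hav]
  -- reduce B's step to explicit components
  have hE1 : ptrEmit (PySem.Dict.ofList tree) verts deg alive ptr' x code
      = (deg.modify v 0 (fun d => d - 1), alive₂,
          (if (deg.modify v 0 (fun d => d - 1)).getD v 0 == 1 &&
              (decide (ptr' = verts.length) || decide (v < verts.getD ptr' 0))
            then some v else none),
          code ++ " " ++ PySem.Int.toStr v) := by
    simp only [ptrEmit]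
    rw [hvB, hB_alive]
  -- A's step
  rw [stepA_some _ _ x hfind, hvA, htr₂, hE1]
  -- re-establish the invariants for the smaller state and apply the induction hypothesis
  set leafB : Option Int :=
    (if (deg.modify v 0 (fun d => d - 1)).getD v 0 == 1 &&
        (decide (ptr' = verts.length) || decide (v < verts.getD ptr' 0))
      then some v else none) with hleafB
  have P1' : ∀ i (h : i < verts.length), ptr' ≤ i → verts[i]'h ∈ alive₂ := by
    intro i h hpi
    exact (halive₂_mem _).mpr ⟨G3 i h hpi, (G0 i h hpi).ne'⟩
  have P2' : ∀ a ∈ alive₂, (liveAdj tree alive₂ a).length = 1 →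
      leafB = some a ∨ ∃ i, ∃ h : i < verts.length, ptr' ≤ i ∧ verts[i]'h = a := by
    intro a ha₂ h1
    obtain ⟨ha, hax⟩ := (halive₂_mem a).mp ha₂
    by_cases hav : a = v
    · subst hav
      by_cases hc : ((deg.modify a 0 (fun d => d - 1)).getD a 0 == 1 &&
          (decide (ptr' = verts.length) || decide (a < verts.getD ptr' 0))) = true
      · left; rw [hleafB, if_pos hc]
      · right
        have hd1 : ((deg.modify a 0 (fun d => d - 1)).getD a 0 == 1) = true := by
          rw [hdeg₂ a ha₂, h1]; simp
        have hor : ¬ (decide (ptr' = verts.length) || decide (a < verts.getD ptr' 0)) = true := by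
          intro hh
          exact hc (by rw [Bool.and_eq_true]; exact ⟨hd1, hh⟩)
        rw [Bool.or_eq_true, not_or] at hor
        obtain ⟨hne, hnlt⟩ := hor
        have hplen : ptr' < verts.length := by
          have hne' : ptr' ≠ verts.length := fun heq => hne (by simp [heq])
          omega
        have hge : verts.getD ptr' 0 ≤ a := by
          by_contra hcon
          exact hnlt (by simpa using (lt_of_not_ge hcon))
        rw [List.getD_eq_getElem verts 0 hplen] at hge
        have havert : a ∈ verts := (hvM a).mpr (hsub a ha)
        obtain ⟨j, hj, hvj⟩ := List.mem_iff_getElem.mp havert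
        refine ⟨j, hj, ?_, hvj⟩
        by_contra hjlt
        have hjlt' : j < ptr' := by omega
        have := List.pairwise_iff_getElem.mp hvS j ptr' hj hplen hjlt'
        rw [hvj] at this
        omega
    · rw [hla₂ a ha hav] at h1
      obtain ⟨i, h, hpi, hvi⟩ := G1 a ha hax h1
      exact Or.inr ⟨i, h, hpi, hvi⟩
  have P3' : ∀ y, leafB = some y → y ∈ alive₂ ∧ (liveAdj tree alive₂ y).length = 1 ∧
      ∀ h : ptr' < verts.length, y < verts[ptr']'h := by
    intro y hy
    rw [hleafB] at hy
    by_cases hc : ((deg.modify v 0 (fun d => d - 1)).getD v 0 == 1 &&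
        (decide (ptr' = verts.length) || decide (v < verts.getD ptr' 0))) = true
    · rw [if_pos hc] at hy
      cases hy
      rw [Bool.and_eq_true] at hc
      obtain ⟨hd1, hor⟩ := hc
      have hlen1 : (liveAdj tree alive₂ v).length = 1 := by
        have := hdeg₂ v hv₂
        rw [this] at hd1
        have : ((liveAdj tree alive₂ v).length : Int) = 1 := by simpa using hd1
        exact_mod_cast this
      refine ⟨hv₂, hlen1, ?_⟩
      intro h
      rw [Bool.or_eq_true] at hor
      rcases hor with hh | hh
      · exact absurd (by simpa using hh) (by omega)
      · have : v < verts.getD ptr' 0 := by simpa using hh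
        rwa [List.getD_eq_getElem verts 0 h] at this
    · rw [if_neg hc] at hy
      exact absurd hy (by simp)
  exact ih alive₂ (deg.modify v 0 (fun d => d - 1)) ptr' leafB
    (code ++ " " ++ PySem.Int.toStr v) (hnd.filter _)
    (fun a ha => hsub a ((halive₂_mem a).mp ha).1) hdeg₂ hptr' P1' P2' P3'

-- the central invariant: A's loop state is mkTr of the alive set; B's pointer state sees
-- every alive leaf either as the pending cascade or at an index at or beyond the pointer
lemma loop_eq (tree : List (Int × List Int)) (verts : List Int)
    (hN : ∀ a ∈ tree.map (·.1), (adjOf tree a).Nodup)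
    (hS : ∀ a ∈ tree.map (·.1), a ∉ adjOf tree a)
    (hE : ∀ a ∈ tree.map (·.1), ∀ y ∈ adjOf tree a,
            y ∈ tree.map (·.1) ∧ a ∈ adjOf tree y)
    (hvS : verts.Pairwise (· < ·))
    (hvM : ∀ a, a ∈ verts ↔ a ∈ tree.map (·.1)) :
    ∀ (n : Nat) (alive : List Int) (deg : PySem.Dict Int Int) (ptr : Nat)
        (leaf : Option Int) (code : String),
      alive.Nodup → (∀ a ∈ alive, a ∈ tree.map (·.1)) →
      (∀ a ∈ alive, deg.getD a 0 = ((liveAdj tree alive a).length : Int)) →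
      ptr ≤ verts.length →
      (∀ i (h : i < verts.length), ptr ≤ i → verts[i]'h ∈ alive) →
      (∀ a ∈ alive, (liveAdj tree alive a).length = 1 →
        leaf = some a ∨ ∃ i, ∃ h : i < verts.length, ptr ≤ i ∧ verts[i]'h = a) →
      (∀ x, leaf = some x → x ∈ alive ∧ (liveAdj tree alive x).length = 1 ∧
        ∀ h : ptr < verts.length, x < verts[ptr]'h) →
      ((fun s : PySem.Dict Int (List Int) × String => pruferStepA s.1 s.2)^[n]
          (mkTr tree alive, code)).2
        = ptrLoop (PySem.Dict.ofList tree) verts n deg alive ptr leaf code := by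
  intro n
  induction n with
  | zero => intro alive deg ptr leaf code _ _ _ _ _ _ _; rfl
  | succ n ih =>
    intro alive deg ptr leaf code hnd hsub hdeg hptr P1 P2 P3
    cases leaf with
    | some x =>
        obtain ⟨hxa, hx1, hxlt⟩ := P3 x rfl
        have G0 : ∀ i (h : i < verts.length), ptr ≤ i → x < verts[i]'h := by
          intro i h hpi
          have hpl : ptr < verts.length := lt_of_le_of_lt hpi h
          rcases Nat.eq_or_lt_of_le hpi with heq | hlt
          · subst heq; exact hxlt h
          · exact (hxlt hpl).trans (List.pairwise_iff_getElem.mp hvS ptr i hpl h hlt)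
        have G1 : ∀ a ∈ alive, a ≠ x → (liveAdj tree alive a).length = 1 →
            ∃ i, ∃ h : i < verts.length, ptr ≤ i ∧ verts[i]'h = a := by
          intro a ha hax h1
          rcases P2 a ha h1 with heq | hidx
          · injection heq with hxy
            exact absurd hxy.symm hax
          · exact hidx
        rw [Function.iterate_succ_apply]
        have hstep := step_case tree verts hN hS hE hvS hvM n ih alive deg code hnd hsub
          hdeg x hxa hx1 ptr hptr P1 G0 G1
        rw [hstep]
        simp only [ptrLoop]
    | none =>
        obtain ⟨hge, hle, hskip, hhit⟩ :=
          sweep_spec verts deg (verts.length - ptr) ptr (by omega) hptr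
        by_cases hp : sweep verts deg ptr = verts.length
        · -- no leaf left at or beyond the pointer ⇒ no leaf at all: both loops go inert
          have hflt : alive.filter (fun a => (liveAdj tree alive a).length == 1) = [] := by
            rw [List.filter_eq_nil_iff]
            intro a ha hpa
            have h1 : (liveAdj tree alive a).length = 1 := by simpa using hpa
            rcases P2 a ha h1 with heq | ⟨i, h, hpi, hvi⟩
            · simp at heq
            · refine hskip i h hpi (by omega) ?_
              rw [hvi, hdeg a ha, h1]
              rfl
          have hkeys : (mkTr tree alive).keys = alive := keys_mapDict alive _
          have hpq : alive.filter (fun a => ((mkTr tree alive).getD a []).length == 1)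
              = alive.filter (fun a => (liveAdj tree alive a).length == 1) := by
            apply List.filter_congr
            intro a ha
            rw [getD_mkTr tree alive a ha]
          have hfind : (PySem.List.sorted (mkTr tree alive).keys (fun x => x) false).find?
              (fun a => ((mkTr tree alive).getD a []).length == 1) = none := by
            rw [hkeys, find?_sorted_eq_min?, hpq, hflt]
            rfl
          have hfix : (fun s : PySem.Dict Int (List Int) × String => pruferStepA s.1 s.2)
              (mkTr tree alive, code) = (mkTr tree alive, code) := stepA_none _ _ hfind
          rw [Function.iterate_fixed hfix]
          simp only [ptrLoop]
          rw [if_pos hp]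
        · have hplt : sweep verts deg ptr < verts.length := lt_of_le_of_ne hle hp
          have hx_alive : verts[sweep verts deg ptr]'hplt ∈ alive := P1 _ hplt hge
          have hx1 : (liveAdj tree alive (verts[sweep verts deg ptr]'hplt)).length = 1 := by
            have hdg := hhit hplt
            rw [hdeg _ hx_alive] at hdg
            exact_mod_cast hdg
          have G0 : ∀ i (h : i < verts.length), sweep verts deg ptr + 1 ≤ i →
              verts[sweep verts deg ptr]'hplt < verts[i]'h := by
            intro i h hpi
            exact List.pairwise_iff_getElem.mp hvS _ i hplt h (by omega)
          have G3 : ∀ i (h : i < verts.length), sweep verts deg ptr + 1 ≤ i →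
              verts[i]'h ∈ alive := by
            intro i h hpi
            exact P1 i h (by omega)
          have G1 : ∀ a ∈ alive, a ≠ verts[sweep verts deg ptr]'hplt →
              (liveAdj tree alive a).length = 1 →
              ∃ i, ∃ h : i < verts.length, sweep verts deg ptr + 1 ≤ i ∧ verts[i]'h = a := by
            intro a ha hax h1
            rcases P2 a ha h1 with heq | ⟨i, h, hpi, hvi⟩
            · simp at heq
            · refine ⟨i, h, ?_, hvi⟩
              by_contra hcon
              have hcon' : i ≤ sweep verts deg ptr := by omega
              rcases Nat.lt_or_ge i (sweep verts deg ptr) with hi | hi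
              · refine hskip i h hpi hi ?_
                rw [hvi, hdeg a ha, h1]
                rfl
              · have : i = sweep verts deg ptr := by omega
                subst this
                exact hax hvi.symm
          rw [Function.iterate_succ_apply]
          have hstep := step_case tree verts hN hS hE hvS hvM n ih alive deg code hnd hsub
            hdeg (verts[sweep verts deg ptr]'hplt) hx_alive hx1 (sweep verts deg ptr + 1)
            (by omega) G3 G0 G1
          rw [hstep]
          simp only [ptrLoop]
          rw [if_neg hp, List.getD_eq_getElem verts 0 hplt]

-- every value produced by an insert-fold keeps a value-property
lemma foldl_insert_val_prop {ν : Type} (P : ν → Prop) (f : Int × List Int → ν) :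
    ∀ (l : List (Int × List Int)) (d : PySem.Dict Int ν),
      (∀ pr ∈ d.items, P pr.2) → (∀ p ∈ l, P (f p)) →
      ∀ pr ∈ (l.foldl (fun d p => d.insert p.1 (f p)) d).items, P pr.2 := by
  intro l
  induction l with
  | nil => intro d hd _ pr hpr; exact hd pr hpr
  | cons a t ih =>
      intro d hd hl pr hpr
      refine ih (d.insert a.1 (f a)) ?_ (fun p hp => hl p (List.mem_cons_of_mem a hp)) pr hpr
      intro q hq
      rcases (PySem.Dict.mem_items_insert _ _ _ _).mp hq with rfl | ⟨hq', _⟩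
      · exact hl a (List.mem_cons_self)
      · exact hd q hq'

-- every key of the input list is a key of an insert-fold over it
lemma mem_keys_foldl_insert {ν : Type} (f : Int × List Int → ν) :
    ∀ (l : List (Int × List Int)) (d : PySem.Dict Int ν) (x : Int),
      x ∈ l.map (·.1) ∨ x ∈ d.keys →
      x ∈ (l.foldl (fun d p => d.insert p.1 (f p)) d).keys := by
  intro l
  induction l with
  | nil => intro d x h; simpa using h
  | cons a t ih =>
      intro d x h
      apply ih (d.insert a.1 (f a)) x
      rcases h with h | h
      · rw [List.map_cons] at h
        rcases List.mem_cons.mp h with heq | h'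
        · exact Or.inr ((PySem.Dict.mem_keys_insert _ _ _ _).mpr (Or.inl heq))
        · exact Or.inl h'
      · exact Or.inr ((PySem.Dict.mem_keys_insert _ _ _ _).mpr (Or.inr h))

-- ===== VERDICT (by name: the statement is the Claim_ definition above) =====
theorem prufer_spec : Claim_equal_prufer := by
  intro tree _ hpre
  unfold Spec_prufer
  show prufer tree = prufer_alt tree
  have hshow : prufer tree = ((PySem.List.pyRange 0 ((tree.length : Int) - 2) 1).foldl
      (fun s _ => pruferStepA s.1 s.2) (PySem.Dict.ofList tree, "")).2 := rfl
  have hshow' : prufer_alt tree = ptrLoop (PySem.Dict.ofList tree)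
      (PySem.List.sorted (tree.map (·.1)) (fun x => x) false)
      ((PySem.List.sorted (tree.map (·.1)) (fun x => x) false).length - 2)
      (tree.foldl (fun d p => d.insert p.1 ((p.2.length : Int))) PySem.Dict.empty)
      (PySem.Set.ofList (tree.map (·.1))) 0 none "" := rfl
  have hvlen : (PySem.List.sorted (tree.map (·.1)) (fun x => x) false).length
      = tree.length := by
    rw [PySem.List.length_sorted, List.length_map]
  rw [hshow, hshow', hvlen]
  rcases hpre with hsmall | hlen1 | ⟨hK, hP⟩
  · -- at most two vertices: neither loop runs
    rw [PySem.List.pyRange_one_eq_nil (by omega : (tree.length : Int) - 2 ≤ 0)]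
    rw [show tree.length - 2 = 0 from by omega]
    rfl
  · -- no adjacency list of length 1: A never finds a leaf, B's sweep falls off the end
    have hvalA : ∀ pr ∈ (PySem.Dict.ofList tree).items, pr.2.length ≠ 1 := by
      have h0 : ∀ pr ∈ (PySem.Dict.empty : PySem.Dict Int (List Int)).items,
          pr.2.length ≠ 1 := by intro pr hpr; simp [PySem.Dict.empty] at hpr
      exact foldl_insert_val_prop (fun v => v.length ≠ 1) (fun p => p.2) tree
        PySem.Dict.empty h0 (fun p hp => hlen1 p hp)
    have hfindnone : (PySem.List.sorted (PySem.Dict.ofList tree).keys (fun x => x) false).find?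
        (fun x => ((PySem.Dict.ofList tree).getD x []).length == 1) = none := by
      apply List.find?_eq_none.mpr
      intro x hx
      rw [PySem.List.mem_sorted] at hx
      cases hg : (PySem.Dict.ofList tree).get? x with
      | none => exact absurd ((PySem.Dict.get?_eq_none_iff_not_mem_keys _ _).mp hg) (by simp [hx])
      | some val =>
          have hne := hvalA (x, val) (PySem.Dict.mem_items_of_get?_eq_some _ hg)
          simp [PySem.Dict.getD, hg]
          exact hne
    have hfix : (fun s : PySem.Dict Int (List Int) × String => pruferStepA s.1 s.2)
        (PySem.Dict.ofList tree, "") = (PySem.Dict.ofList tree, "") :=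
      stepA_none _ _ hfindnone
    have hA : ((PySem.List.pyRange 0 ((tree.length : Int) - 2) 1).foldl
        (fun s _ => pruferStepA s.1 s.2) (PySem.Dict.ofList tree, "")).2 = "" := by
      rw [foldl_const_eq_iterate
        (fun s : PySem.Dict Int (List Int) × String => pruferStepA s.1 s.2)]
      rw [Function.iterate_fixed hfix]
    have hvalB : ∀ pr ∈ (tree.foldl (fun d p => d.insert p.1 ((p.2.length : Int)))
        PySem.Dict.empty).items, pr.2 ≠ (1 : Int) := by
      have h0 : ∀ pr ∈ (PySem.Dict.empty : PySem.Dict Int Int).items,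
          pr.2 ≠ (1 : Int) := by intro pr hpr; simp [PySem.Dict.empty] at hpr
      refine foldl_insert_val_prop (fun v => v ≠ (1 : Int))
        (fun p => (p.2.length : Int)) tree PySem.Dict.empty h0 ?_
      intro p hp
      have h1 := hlen1 p hp
      show ((p.2.length : Int)) ≠ 1
      exact_mod_cast h1
    have hgetD1 : ∀ x ∈ tree.map (·.1),
        ¬ (tree.foldl (fun d p => d.insert p.1 ((p.2.length : Int)))
          PySem.Dict.empty).getD x 0 = 1 := by
      intro x hxm
      have hk : x ∈ (tree.foldl (fun d p => d.insert p.1 ((p.2.length : Int)))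
          PySem.Dict.empty).keys :=
        mem_keys_foldl_insert (fun p => (p.2.length : Int)) tree PySem.Dict.empty x
          (Or.inl hxm)
      cases hg : (tree.foldl (fun d p => d.insert p.1 ((p.2.length : Int)))
          PySem.Dict.empty).get? x with
      | none => exact absurd ((PySem.Dict.get?_eq_none_iff_not_mem_keys _ _).mp hg) (by simp [hk])
      | some val =>
          have hne := hvalB (x, val) (PySem.Dict.mem_items_of_get?_eq_some _ hg)
          simp [PySem.Dict.getD, hg]
          exact hne
    have hsweep : sweep (PySem.List.sorted (tree.map (·.1)) (fun x => x) false)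
        (tree.foldl (fun d p => d.insert p.1 ((p.2.length : Int))) PySem.Dict.empty) 0
        = (PySem.List.sorted (tree.map (·.1)) (fun x => x) false).length := by
      obtain ⟨_, hle, _, hhit⟩ := sweep_spec
        (PySem.List.sorted (tree.map (·.1)) (fun x => x) false)
        (tree.foldl (fun d p => d.insert p.1 ((p.2.length : Int))) PySem.Dict.empty)
        ((PySem.List.sorted (tree.map (·.1)) (fun x => x) false).length) 0
        (by omega) (by omega)
      rcases Nat.eq_or_lt_of_le hle with heq | hlt
      · exact heq
      · exfalso
        refine hgetD1 _ ?_ (hhit hlt)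
        have hm := List.getElem_mem hlt
        rw [PySem.List.mem_sorted] at hm
        exact hm
    have hB : ptrLoop (PySem.Dict.ofList tree)
        (PySem.List.sorted (tree.map (·.1)) (fun x => x) false) (tree.length - 2)
        (tree.foldl (fun d p => d.insert p.1 ((p.2.length : Int))) PySem.Dict.empty)
        (PySem.Set.ofList (tree.map (·.1))) 0 none "" = "" := by
      cases hn : tree.length - 2 with
      | zero => rfl
      | succ n =>
          simp only [ptrLoop]
          rw [if_pos hsweep]
    rw [hA, hB]
  · -- a simple symmetric graph: run the pointer invariant
    have hitems : (PySem.Dict.ofList tree).items = tree := items_ofList_nodup tree hK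
    have hkeys0 : (PySem.Dict.ofList tree).keys = tree.map (·.1) := by
      simp only [PySem.Dict.keys, hitems]
    have hknd : (PySem.Dict.ofList tree).keys.Nodup := by rw [hkeys0]; exact hK
    have hadj : ∀ p ∈ tree, adjOf tree p.1 = p.2 := by
      intro p hp
      have hmem : (p.1, p.2) ∈ (PySem.Dict.ofList tree).items := by
        rw [hitems]; simpa using hp
      have hg := PySem.Dict.get?_of_mem_items _ hmem hknd
      unfold adjOf
      simp [PySem.Dict.getD, hg]
    have hN : ∀ a ∈ tree.map (·.1), (adjOf tree a).Nodup := by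
      intro a ha
      obtain ⟨p, hp, rfl⟩ := List.mem_map.mp ha
      rw [hadj p hp]; exact (hP p hp).1
    have hS : ∀ a ∈ tree.map (·.1), a ∉ adjOf tree a := by
      intro a ha
      obtain ⟨p, hp, rfl⟩ := List.mem_map.mp ha
      rw [hadj p hp]; exact (hP p hp).2.1
    have hE : ∀ a ∈ tree.map (·.1), ∀ y ∈ adjOf tree a,
        y ∈ tree.map (·.1) ∧ a ∈ adjOf tree y := by
      intro a ha y hy
      obtain ⟨p, hp, rfl⟩ := List.mem_map.mp ha
      rw [hadj p hp] at hy
      obtain ⟨q, hq, hq1, hq2⟩ := (hP p hp).2.2 y hy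
      refine ⟨List.mem_map.mpr ⟨q, hq, hq1⟩, ?_⟩
      rw [← hq1, hadj q hq]
      exact hq2
    have hliveK : ∀ a ∈ tree.map (·.1),
        liveAdj tree (tree.map (·.1)) a = adjOf tree a := by
      intro a ha
      unfold liveAdj
      apply List.filter_eq_self.mpr
      intro y hy
      exact (PySem.Set.contains_iff (tree.map (·.1)) y).mpr (hE a ha y hy).1
    have hmk : mkTr tree (tree.map (·.1)) = PySem.Dict.ofList tree := by
      apply PySem.Dict.ext
      rw [hitems]
      show (tree.map (·.1)).map (fun a => (a, liveAdj tree (tree.map (·.1)) a)) = tree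
      rw [List.map_congr_left (fun a ha => by rw [hliveK a ha] :
        ∀ a ∈ tree.map (·.1),
          (a, liveAdj tree (tree.map (·.1)) a) = (a, adjOf tree a))]
      rw [List.map_map]
      have : ∀ p ∈ tree, ((fun a => (a, adjOf tree a)) ∘ (fun x : Int × List Int => x.1)) p
          = id p := by
        intro p hp
        show (p.1, adjOf tree p.1) = p
        rw [hadj p hp]
      rw [List.map_congr_left this, List.map_id]
    have hdegitems : (tree.foldl (fun d p => d.insert p.1 ((p.2.length : Int)))
        PySem.Dict.empty).items = tree.map (fun p => (p.1, (p.2.length : Int))) := by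
      have h0 : ∀ p ∈ tree, (PySem.Dict.empty : PySem.Dict Int Int).contains
          ((fun q : Int × List Int => q.1) p) = false := fun p _ => rfl
      have hfresh : (tree.foldl (fun d p => d.insert p.1 ((p.2.length : Int)))
            PySem.Dict.empty).items
          = (PySem.Dict.empty : PySem.Dict Int Int).items
              ++ tree.map (fun p => (p.1, (p.2.length : Int))) :=
        PySem.Dict.items_foldl_insert_fresh tree (fun q => q.1)
          (fun q => (q.2.length : Int)) PySem.Dict.empty h0 (by simpa using hK)
      rw [hfresh]
      simp [PySem.Dict.empty]
    have hdegkeys : (tree.foldl (fun d p => d.insert p.1 ((p.2.length : Int)))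
        PySem.Dict.empty).keys = tree.map (·.1) := by
      simp only [PySem.Dict.keys, hdegitems, List.map_map]
      rfl
    have hdeg : ∀ a ∈ tree.map (·.1),
        (tree.foldl (fun d p => d.insert p.1 ((p.2.length : Int)))
          PySem.Dict.empty).getD a 0
        = ((liveAdj tree (tree.map (·.1)) a).length : Int) := by
      intro a ha
      obtain ⟨p, hp, rfl⟩ := List.mem_map.mp ha
      have hm : (p.1, (p.2.length : Int)) ∈ (tree.foldl
          (fun d p => d.insert p.1 ((p.2.length : Int))) PySem.Dict.empty).items := by
        rw [hdegitems]; exact List.mem_map.mpr ⟨p, hp, rfl⟩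
      have hg := PySem.Dict.get?_of_mem_items _ hm (by rw [hdegkeys]; exact hK)
      rw [hliveK _ ha, hadj p hp]
      simp [PySem.Dict.getD, hg]
    -- strict order and membership of the sorted vertex list
    have hperm := PySem.List.sorted_perm (tree.map (·.1)) (fun x => x) false
    have hvnd : (PySem.List.sorted (tree.map (·.1)) (fun x => x) false).Nodup :=
      hperm.nodup_iff.mpr hK
    have hvle : (PySem.List.sorted (tree.map (·.1)) (fun x => x) false).Pairwise (· ≤ ·) :=
      PySem.List.sorted_pairwise (tree.map (·.1)) (fun x => x)
    have hvS : (PySem.List.sorted (tree.map (·.1)) (fun x => x) false).Pairwise (· < ·) :=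
      (hvle.and hvnd).imp (fun h => lt_of_le_of_ne h.1 h.2)
    have hvM : ∀ a, a ∈ PySem.List.sorted (tree.map (·.1)) (fun x => x) false
        ↔ a ∈ tree.map (·.1) := by
      intro a
      exact PySem.List.mem_sorted _ _ _ _
    rw [foldl_const_eq_iterate
      (fun s : PySem.Dict Int (List Int) × String => pruferStepA s.1 s.2)]
    rw [PySem.List.length_pyRange_one]
    rw [show (((tree.length : Int) - 2) - 0).toNat = tree.length - 2 from by omega]
    rw [PySem.Set.ofList_eq_self_of_nodup _ hK]
    conv_lhs => rw [← hmk]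
    refine loop_eq tree _ hN hS hE hvS hvM (tree.length - 2) (tree.map (·.1)) _ 0 none ""
      hK (fun a ha => ha) hdeg (by omega) ?_ ?_ ?_
    · intro i h _
      exact (hvM _).mp (List.getElem_mem h)
    · intro a ha h1
      right
      obtain ⟨i, hi, hvi⟩ := List.mem_iff_getElem.mp ((hvM a).mpr ha)
      exact ⟨i, hi, Nat.zero_le i, hvi⟩
    · intro x h
      simp at h
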